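-- pv_equiv track=rewrite | github.com/migregal/bmstu-iu7-cg | lab_05/main.py | __find_max_x
-- ===== SOURCE A (Python) =====
-- def __find_max_x(ed):
--     x_max = None
--     for i in range(len(ed)):
--         if x_max is None or ed[i][0] > x_max:
--             x_max = ed[i][0]
--
--         if x_max is None or ed[i][2] > x_max:
--             x_max = ed[i][2]
--
--     return x_max
-- ===== SOURCE B (Python) =====
-- def __find_max_x(ed):
--     m0 = max((e[0] for e in ed), default=None)
--     m2 = max((e[2] for e in ed), default=None)
--     if m0 is None:
--         return m2
--     if m2 is None:
--         return m0
--     return m0 if m0 >= m2 else m2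
-- ===== Notes on version B (the rewrite author's own statement) =====
-- stated objective: alternative
-- what changed: A's single interleaved scan updating one running max against both columns is replaced by two independent column reductions (max over e[0] and max over e[2], default None) combined at the end.
import Mathlib
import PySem

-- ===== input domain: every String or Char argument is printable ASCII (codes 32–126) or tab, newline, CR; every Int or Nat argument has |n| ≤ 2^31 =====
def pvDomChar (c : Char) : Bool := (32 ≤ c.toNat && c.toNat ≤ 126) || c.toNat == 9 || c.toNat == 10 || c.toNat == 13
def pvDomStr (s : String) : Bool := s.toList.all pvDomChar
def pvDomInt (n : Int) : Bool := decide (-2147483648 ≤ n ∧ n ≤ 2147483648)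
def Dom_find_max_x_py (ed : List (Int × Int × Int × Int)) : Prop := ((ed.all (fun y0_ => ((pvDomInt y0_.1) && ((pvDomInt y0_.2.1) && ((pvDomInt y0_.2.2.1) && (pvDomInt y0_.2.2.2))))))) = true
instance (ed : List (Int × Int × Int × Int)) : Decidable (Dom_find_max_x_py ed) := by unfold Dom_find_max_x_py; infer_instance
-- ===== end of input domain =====

-- B replaces A's single interleaved running-max scan by two independent column
-- reductions combined at the end (alternative decomposition; return value only).
-- ===== PORT A =====
-- one loop iteration of A: update x_max against ed[i][0], then against ed[i][2]
def find_max_x_step (x_max : Option Int) (e : Int × Int × Int × Int) : Option Int :=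
  let x_max := match x_max with
    | none => some e.1
    | some v => if e.1 > v then some e.1 else some v
  match x_max with
  | none => some e.2.2.1
  | some v => if e.2.2.1 > v then some e.2.2.1 else some v

def find_max_x_py (ed : List (Int × Int × Int × Int)) : Option Int :=
  ed.foldl find_max_x_step none

-- ===== PORT B =====
def find_max_x_py_alt (ed : List (Int × Int × Int × Int)) : Option Int :=
  let m0 := PySem.List.max? (ed.map (fun e => e.1)) (fun y => y)
  let m2 := PySem.List.max? (ed.map (fun e => e.2.2.1)) (fun y => y)
  match m0, m2 with
  | none, m2 => m2
  | some a, none => some a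
  | some a, some b => if a ≥ b then some a else some b

-- ===== PRECONDITION & SPEC =====
def Spec_find_max_x_py (ed : List (Int × Int × Int × Int)) (out : Option Int) : Prop := out = find_max_x_py_alt ed
instance (ed : List (Int × Int × Int × Int)) (out : Option Int) : Decidable (Spec_find_max_x_py ed out) := by unfold Spec_find_max_x_py; infer_instance

-- ===== CLAIM (what is proved, stated in full; the proofs are below) =====
def Claim_equal_find_max_x_py : Prop := ∀ (ed : List (Int × Int × Int × Int)), Dom_find_max_x_py ed → Spec_find_max_x_py ed (find_max_x_py ed)

-- ===== LEMMAS AND PROOFS =====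

-- ===== VERDICT (by name: the statement is the Claim_ definition above) =====
-- one step on a `some` accumulator is a double max
theorem find_max_x_step_some (v : Int) (e : Int × Int × Int × Int) :
    find_max_x_step (some v) e = some (max (max v e.1) e.2.2.1) := by
  unfold find_max_x_step
  by_cases h1 : e.1 > v
  · simp only [if_pos h1]
    by_cases h2 : e.2.2.1 > e.1 <;> simp [h2, max_def] <;> omega
  · simp only [if_neg h1]
    by_cases h2 : e.2.2.1 > v <;> simp [h2, max_def] <;> omega

theorem find_max_x_foldl_some (ed : List (Int × Int × Int × Int)) (v : Int) :
    ed.foldl find_max_x_step (some v)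
      = some (ed.foldl (fun a e => max (max a e.1) e.2.2.1) v) := by
  induction ed generalizing v with
  | nil => rfl
  | cons e t ih => simp [List.foldl_cons, find_max_x_step_some, ih]

theorem foldl_max_split (ed : List (Int × Int × Int × Int)) (a b : Int) :
    ed.foldl (fun a e => max (max a e.1) e.2.2.1) (max a b)
      = max ((ed.map (fun e => e.1)).foldl max a)
            ((ed.map (fun e => e.2.2.1)).foldl max b) := by
  induction ed generalizing a b with
  | nil => rfl
  | cons e t ih =>
      simp only [List.foldl_cons, List.map_cons]
      rw [show max (max (max a b) e.1) e.2.2.1 = max (max a e.1) (max b e.2.2.1) by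
        simp [max_def]; omega]
      exact ih _ _

theorem find_max_x_py_spec : Claim_equal_find_max_x_py := by
  intro ed _
  unfold Spec_find_max_x_py find_max_x_py find_max_x_py_alt
  cases ed with
  | nil => rfl
  | cons e t =>
      simp only [List.foldl_cons, List.map_cons, PySem.List.max?_id_cons]
      have h0 : find_max_x_step none e = some (max e.1 e.2.2.1) := by
        unfold find_max_x_step
        by_cases h2 : e.2.2.1 > e.1 <;> simp [h2, max_def] <;> omega
      rw [h0, find_max_x_foldl_some, foldl_max_split]
      simp [List.foldl_map, max_def]
      split_ifs <;> simp <;> omega
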